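-- pv_equiv track=rewrite | github.com/zofialuther/CS8395-08-Paper1-updated | data/translated-code/pseudo-to-python/python/Chowla-numbers.py | chowla
-- ===== SOURCE A (Python) =====
-- def chowla(n):
--     if n < 2:
--         return 0
--     else:
--         divisorsList = [x for x in range(1, n+1) if n % x == 0]
--         sumOfDivisors = 0
--         for divisor in divisorsList:
--             sumOfDivisors = sumOfDivisors + divisor
--         return sumOfDivisors - 1 - n
-- ===== SOURCE B (Python) =====
-- def chowla(n):
--     if n < 2:
--         return 0
--     s = 0
--     d = 2
--     while d * d <= n:
--         if n % d == 0:
--             s += d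
--             q = n // d
--             if q != d:
--                 s += q
--         d += 1
--     return s
-- ===== Notes on version B (the rewrite author's own statement) =====
-- stated objective: faster
-- what changed: Instead of scanning every candidate up to n and summing all divisors then subtracting the trivial ones, B scans only d up to sqrt(n) and adds each divisor d together with its cofactor n//d (skipping the square-root double count), never touching the trivial divisors.
import Mathlib
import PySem

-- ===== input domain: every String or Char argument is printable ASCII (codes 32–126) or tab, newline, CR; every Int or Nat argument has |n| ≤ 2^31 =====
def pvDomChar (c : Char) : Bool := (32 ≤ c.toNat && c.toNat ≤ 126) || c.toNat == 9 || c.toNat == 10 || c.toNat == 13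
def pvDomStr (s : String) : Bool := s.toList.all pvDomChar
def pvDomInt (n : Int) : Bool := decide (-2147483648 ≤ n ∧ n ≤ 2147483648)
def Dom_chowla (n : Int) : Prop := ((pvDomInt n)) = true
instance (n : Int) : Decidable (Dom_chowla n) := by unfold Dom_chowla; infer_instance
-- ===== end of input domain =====

-- B replaces A's scan of all candidates up to n by a loop over d ≤ √n that adds each divisor d together with its cofactor n // d.

-- ===== PORT A =====
def chowla (n : Int) : Int :=
  if n < 2 then 0
  else
    -- divisorsList comprehension over the full range, then the for-loop sums it
    ((PySem.List.pyRange 1 (n+1) 1).filter (fun x => PySem.Int.mod n x == 0)).foldl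
      (fun sumOfDivisors divisor => sumOfDivisors + divisor) 0 - 1 - n

-- ===== PORT B =====
-- Source B's while loop over d = 2, 3, …; written with d = 2 + i so the recursion terminates on (n+1-d*d).
def chowlaAltLoop (n : Int) (i : Nat) (s : Int) : Int :=
  if (2 + (i : Int)) * (2 + (i : Int)) ≤ n then
    chowlaAltLoop n (i+1)
      (if PySem.Int.mod n (2 + (i : Int)) == 0 then
        (if PySem.Int.floordiv n (2 + (i : Int)) ≠ 2 + (i : Int) then
          s + (2 + (i : Int)) + PySem.Int.floordiv n (2 + (i : Int))
        else s + (2 + (i : Int)))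
      else s)
  else s
termination_by (n + 1 - (2 + (i : Int)) * (2 + (i : Int))).toNat
decreasing_by
  have h : (2 + (i : Int)) * (2 + (i : Int)) ≤ n := by assumption
  have h3 : (0:Int) ≤ (i:Int) := Int.natCast_nonneg i
  push_cast
  have h2 : (2 + ((i:Int)+1)) * (2 + ((i:Int)+1)) = (2 + (i:Int)) * (2 + (i:Int)) + (2*(i:Int)+5) := by ring
  rw [h2]
  generalize (2 + (i:Int)) * (2 + (i:Int)) = a at h ⊢
  omega

def chowla_alt (n : Int) : Int :=
  if n < 2 then 0 else chowlaAltLoop n 0 0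

-- ===== PRECONDITION & SPEC =====
def Spec_chowla (n : Int) (out : Int) : Prop := out = chowla_alt n
instance (n : Int) (out : Int) : Decidable (Spec_chowla n out) := by unfold Spec_chowla; infer_instance

-- ===== CLAIM (what is proved, stated in full; the proofs are below) =====
def Claim_equal_chowla : Prop := ∀ (n : Int), Dom_chowla n → Spec_chowla n (chowla n)

-- ===== LEMMAS AND PROOFS =====

-- one divisor's contribution to B's loop, as a Nat-level function
def chowlaBContrib (N m : ℕ) : ℕ := m + if m * m < N then N / m else 0

theorem modBridge (N D : ℕ) (hD : 0 < D) :
    ((PySem.Int.mod (N : Int) (D:Int) == 0) = true) ↔ D ∣ N := by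
  have hm : PySem.Int.mod (N:Int) (D:Int) = ((N % D : ℕ) : Int) := by
    rw [PySem.Int.mod_eq_emod_of_pos (by exact_mod_cast hD)]
    push_cast
    omega
  rw [hm, beq_iff_eq]
  simp only [Nat.cast_eq_zero]
  exact Nat.dvd_iff_mod_eq_zero.symm

-- N/d = d iff N = d*d, for a positive divisor d of N
theorem cofac (N d : ℕ) (hd : 0 < d) (hdvd : d ∣ N) : N / d = d ↔ N = d * d := by
  obtain ⟨c, rfl⟩ := hdvd
  rw [Nat.mul_div_cancel_left c hd]
  constructor
  · rintro rfl; rfl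
  · intro h; exact (Nat.eq_of_mul_eq_mul_left hd h.symm).symm

-- ===== A-side: the fold over the filtered range is the divisor sum =====
theorem sumA_aux (N : ℕ) (M : ℕ) :
    (((List.range M).map (fun k : ℕ => (1:ℤ) + (k:ℤ))).filter (fun x => PySem.Int.mod (N:Int) x == 0)).sum
      = ((∑ m ∈ Finset.Ico 1 (M+1), if m ∣ N then m else 0 : ℕ) : ℤ) := by
  induction M with
  | zero => simp
  | succ M ih =>
    rw [List.range_succ, List.map_append, List.filter_append, List.sum_append, ih,
        show (∑ m ∈ Finset.Ico 1 (M+1+1), if m ∣ N then m else 0)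
          = (∑ m ∈ Finset.Ico 1 (M+1), if m ∣ N then m else 0) + (if (M+1) ∣ N then (M+1) else 0) from
          Finset.sum_Ico_succ_top (by omega) _]
    have hc : (1 + (M:Int)) = (((M+1:ℕ)):Int) := by push_cast; ring
    by_cases h : (M+1) ∣ N
    · have hb : (PySem.Int.mod (N:Int) (1 + (M:Int)) == 0) = true := by
        rw [hc]; exact (modBridge N (M+1) (by omega)).mpr h
      rw [List.map_singleton, List.filter_singleton, hb]
      simp only [cond_true, List.sum_singleton, if_pos h]
      push_cast
      ring
    · have hb : (PySem.Int.mod (N:Int) (1 + (M:Int)) == 0) = false := by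
        rcases hbb : (PySem.Int.mod (N:Int) (1 + (M:Int)) == 0) with _ | _
        · rfl
        · rw [hc] at hbb
          exact absurd ((modBridge N (M+1) (by omega)).mp hbb) h
      rw [List.map_singleton, List.filter_singleton, hb]
      simp [h]

theorem chowla_A_sum (N : ℕ) (hN : 2 ≤ N) :
    chowla (N : Int) = ((∑ m ∈ N.divisors, m : ℕ) : ℤ) - 1 - (N:Int) := by
  rw [chowla, if_neg (by omega)]
  have h1 : PySem.List.pyRange 1 ((N:Int)+1) 1 = (List.range N).map (fun k : ℕ => (1:ℤ) + (k:ℤ)) := by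
    rw [PySem.List.pyRange_one, show (((N:Int)+1) - 1).toNat = N from by omega]
  have h2 : ∀ l : List ℤ, l.foldl (fun a b => a + b) 0 = l.sum := by
    intro l; simp [List.sum_eq_foldl]
  rw [h1, h2, sumA_aux N N,
      show N.divisors = Finset.filter (fun i => i ∣ N) (Finset.Ico 1 (N+1)) from rfl,
      Finset.sum_filter]

-- ===== B-side: the loop computes the paired-divisor sum =====
theorem loop_exit (N : ℕ) (i : ℕ) (s : ℤ) (hgt : N < (2+i)*(2+i)) :
    chowlaAltLoop (N : Int) i s
      = s + ((∑ m ∈ N.divisors.filter (fun m => 2 + i ≤ m ∧ m * m ≤ N), chowlaBContrib N m : ℕ) : ℤ) := by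
  rw [chowlaAltLoop, if_neg (by exact_mod_cast not_le.mpr (by exact_mod_cast hgt))]
  have h0 : N.divisors.filter (fun m => 2 + i ≤ m ∧ m * m ≤ N) = ∅ := by
    apply Finset.filter_eq_empty_iff.mpr
    intro m _
    rintro ⟨h1, h2⟩
    exact absurd (le_trans (Nat.mul_le_mul h1 h1) h2) (not_le.mpr hgt)
  simp [h0]

theorem chowla_B_loop_aux (N : ℕ) (hN : 2 ≤ N) (fuel : ℕ) :
    ∀ (i : ℕ) (s : ℤ), N + 1 - (2+i)*(2+i) ≤ fuel →
    chowlaAltLoop (N : Int) i s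
      = s + ((∑ m ∈ N.divisors.filter (fun m => 2 + i ≤ m ∧ m * m ≤ N), chowlaBContrib N m : ℕ) : ℤ) := by
  induction fuel with
  | zero =>
    intro i s hf
    have hgt : N < (2+i)*(2+i) := by
      generalize hx : (2+i)*(2+i) = x at hf
      omega
    exact loop_exit N i s hgt
  | succ fuel ih =>
    intro i s hf
    by_cases hle : (2+i)*(2+i) ≤ N
    · set D : ℕ := 2 + i with hD
      have hD0 : 0 < D := by omega
      rw [chowlaAltLoop, if_pos (by exact_mod_cast hle)]
      have hq : PySem.Int.floordiv (N:Int) (2 + (i:Int)) = ((N / D : ℕ) : Int) := by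
        rw [show (2 + (i:Int)) = ((D:ℕ):Int) by push_cast [hD]; ring]
        exact_mod_cast PySem.Int.floordiv_natCast N D
      have hfuel' : N + 1 - (2+(i+1))*(2+(i+1)) ≤ fuel := by
        have he : (2+(i+1))*(2+(i+1)) = (2+i)*(2+i) + (2*i+5) := by ring
        rw [he]
        generalize hx : (2+i)*(2+i) = x at hf hle
        omega
      have hcast : (2 + (i:Int)) = ((D:ℕ):Int) := by push_cast [hD]; ring
      by_cases hdvd : D ∣ N
      · -- the if takes the divisor branch
        have hb : (PySem.Int.mod (N:Int) (2 + (i:Int)) == 0) = true := by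
          rw [hcast]; exact (modBridge N D hD0).mpr hdvd
        rw [hb]
        -- the set splits off D
        have hins : N.divisors.filter (fun m => 2 + i ≤ m ∧ m * m ≤ N)
            = insert D (N.divisors.filter (fun m => 2 + (i+1) ≤ m ∧ m * m ≤ N)) := by
          ext m
          simp only [Finset.mem_filter, Finset.mem_insert]
          constructor
          · rintro ⟨hm, h1, h2⟩
            by_cases hmD : m = D
            · exact Or.inl hmD
            · exact Or.inr ⟨hm, by omega, h2⟩
          · rintro (rfl | ⟨hm, h1, h2⟩)
            · exact ⟨Nat.mem_divisors.mpr ⟨hdvd, by omega⟩, by omega, hle⟩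
            · exact ⟨hm, by omega, h2⟩
        have hnot : D ∉ N.divisors.filter (fun m => 2 + (i+1) ≤ m ∧ m * m ≤ N) := by
          simp only [Finset.mem_filter]
          rintro ⟨-, h1, -⟩
          omega
        rw [hins, Finset.sum_insert hnot]
        have hrec := ih (i+1) (if ((N / D : ℕ) : Int) ≠ ((D:ℕ):Int) then s + ((D:ℕ):Int) + ((N / D : ℕ) : Int) else s + ((D:ℕ):Int)) hfuel'
        rw [hq, hcast] at *
        rw [if_pos (rfl : true = true), hrec]
        have hiff : ((N / D : ℕ) : Int) ≠ ((D:ℕ):Int) ↔ D * D < N := by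
          rw [Ne, Nat.cast_inj, cofac N D hD0 hdvd]
          constructor
          · intro h; omega
          · intro h; omega
        unfold chowlaBContrib
        by_cases hlt : D * D < N
        · rw [if_pos (hiff.mpr hlt), if_pos hlt]
          push_cast
          ring
        · rw [if_neg (fun h => hlt (hiff.mp h)), if_neg hlt]
          push_cast
          ring
      · -- not a divisor: state and set unchanged
        have hb : (PySem.Int.mod (N:Int) (2 + (i:Int)) == 0) = false := by
          rcases hbb : (PySem.Int.mod (N:Int) (2 + (i:Int)) == 0) with _ | _
          · rfl
          · rw [hcast] at hbb
            exact absurd ((modBridge N D hD0).mp hbb) hdvd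
        rw [hb, if_neg (fun h => Bool.false_ne_true h)]
        have hset : N.divisors.filter (fun m => 2 + i ≤ m ∧ m * m ≤ N)
            = N.divisors.filter (fun m => 2 + (i+1) ≤ m ∧ m * m ≤ N) := by
          apply Finset.filter_congr
          intro m hm
          have hmd : m ∣ N := (Nat.mem_divisors.mp hm).1
          constructor
          · rintro ⟨h1, h2⟩
            refine ⟨?_, h2⟩
            rcases Nat.eq_or_lt_of_le h1 with h | h
            · exact absurd (show D ∣ N from by rw [hD, h]; exact hmd) hdvd
            · omega
          · rintro ⟨h1, h2⟩; exact ⟨by omega, h2⟩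
        rw [hset]
        exact ih (i+1) s hfuel'
    · exact loop_exit N i s (by omega)

theorem chowla_B_loop (N : ℕ) (hN : 2 ≤ N) (i : ℕ) (s : ℤ) :
    chowlaAltLoop (N : Int) i s
      = s + ((∑ m ∈ N.divisors.filter (fun m => 2 + i ≤ m ∧ m * m ≤ N), chowlaBContrib N m : ℕ) : ℤ) :=
  chowla_B_loop_aux N hN (N + 1 - (2+i)*(2+i)) i s le_rfl

-- ===== the pairing: d ≤ √N divisors and their cofactors give all divisors in [2, N-1] =====
theorem chowla_pairing (N : ℕ) (hN : 2 ≤ N) :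
    (∑ m ∈ N.divisors.filter (fun m => 2 ≤ m ∧ m * m ≤ N), chowlaBContrib N m) + 1 + N
      = ∑ m ∈ N.divisors, m := by
  have hN0 : N ≠ 0 := by omega
  have hsmall_lt : ∀ m, m ∈ N.divisors → 2 ≤ m → m * m ≤ N → m < N := by
    intro m _ h2 hle
    have : m * 2 ≤ m * m := Nat.mul_le_mul_left m h2
    omega
  have hsplit :
      (∑ m ∈ N.divisors.filter (fun m => 2 ≤ m ∧ m * m ≤ N), chowlaBContrib N m)
        = (∑ m ∈ N.divisors.filter (fun m => 2 ≤ m ∧ m * m ≤ N), m)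
          + (∑ m ∈ N.divisors.filter (fun m => 2 ≤ m ∧ m * m < N), N / m) := by
    unfold chowlaBContrib
    rw [Finset.sum_add_distrib]
    congr 1
    rw [← Finset.sum_filter, Finset.filter_filter]
    apply Finset.sum_congr
    · apply Finset.filter_congr
      intro m _
      constructor
      · rintro ⟨⟨h1, _⟩, h2⟩; exact ⟨h1, h2⟩
      · rintro ⟨h1, h2⟩; exact ⟨⟨h1, le_of_lt h2⟩, h2⟩
    · intro _ _; rfl
  have hbij :
      (∑ m ∈ N.divisors.filter (fun m => 2 ≤ m ∧ m * m < N), N / m)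
        = (∑ m ∈ N.divisors.filter (fun m => 2 ≤ m ∧ N < m * m ∧ m < N), m) := by
    apply Finset.sum_nbij' (fun m => N / m) (fun m => N / m)
    · intro a ha
      simp only [Finset.mem_filter, Nat.mem_divisors] at ha ⊢
      obtain ⟨⟨⟨c, rfl⟩, -⟩, h2, hlt⟩ := ha
      have ha0 : 0 < a := by omega
      have hc : a < c := by nlinarith
      rw [Nat.mul_div_cancel_left c ha0]
      exact ⟨⟨⟨a, mul_comm a c⟩, hN0⟩, by omega, by nlinarith, by nlinarith⟩
    · intro a ha
      simp only [Finset.mem_filter, Nat.mem_divisors] at ha ⊢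
      obtain ⟨⟨⟨c, rfl⟩, -⟩, h2, hgt, hlt⟩ := ha
      have ha0 : 0 < a := by omega
      have hc0 : 0 < c := by nlinarith
      have hc : c < a := by nlinarith
      rw [Nat.mul_div_cancel_left c ha0]
      have hc2 : 2 ≤ c := by nlinarith
      exact ⟨⟨⟨a, mul_comm a c⟩, hN0⟩, hc2, by nlinarith⟩
    · intro a ha
      simp only [Finset.mem_filter, Nat.mem_divisors] at ha
      exact Nat.div_div_self ha.1.1 hN0
    · intro a ha
      simp only [Finset.mem_filter, Nat.mem_divisors] at ha
      exact Nat.div_div_self ha.1.1 hN0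
    · intro a ha
      rfl
  have hmid : N.divisors.filter (fun m => 2 ≤ m ∧ m < N)
      = (N.divisors.filter (fun m => 2 ≤ m ∧ m * m ≤ N))
        ∪ (N.divisors.filter (fun m => 2 ≤ m ∧ N < m * m ∧ m < N)) := by
    ext m
    simp only [Finset.mem_filter, Finset.mem_union]
    constructor
    · rintro ⟨hm, h2, hlt⟩
      by_cases h : m * m ≤ N
      · exact Or.inl ⟨hm, h2, h⟩
      · exact Or.inr ⟨hm, h2, by omega, hlt⟩
    · rintro (⟨hm, h2, h⟩ | ⟨hm, h2, -, hlt⟩)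
      · exact ⟨hm, h2, hsmall_lt m hm h2 h⟩
      · exact ⟨hm, h2, hlt⟩
  have hdisj : Disjoint (N.divisors.filter (fun m => 2 ≤ m ∧ m * m ≤ N))
      (N.divisors.filter (fun m => 2 ≤ m ∧ N < m * m ∧ m < N)) := by
    rw [Finset.disjoint_left]
    intro m hm1 hm2
    simp only [Finset.mem_filter] at hm1 hm2
    omega
  have hdecomp : N.divisors = insert 1 (insert N (N.divisors.filter (fun m => 2 ≤ m ∧ m < N))) := by
    ext m
    simp only [Finset.mem_insert, Finset.mem_filter, Nat.mem_divisors]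
    constructor
    · rintro ⟨hdvd, -⟩
      have h1 : 1 ≤ m := Nat.one_le_iff_ne_zero.mpr (by rintro rfl; exact hN0 (Nat.eq_zero_of_zero_dvd hdvd))
      have h2 : m ≤ N := Nat.le_of_dvd (by omega) hdvd
      rcases Nat.eq_or_lt_of_le h2 with h | h
      · exact Or.inr (Or.inl h)
      · rcases Nat.eq_or_lt_of_le h1 with h1' | h1'
        · exact Or.inl h1'.symm
        · exact Or.inr (Or.inr ⟨⟨hdvd, hN0⟩, by omega, h⟩)
    · rintro (rfl | rfl | ⟨⟨hdvd, -⟩, -, -⟩)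
      · exact ⟨one_dvd N, hN0⟩
      · exact ⟨dvd_refl _, hN0⟩
      · exact ⟨hdvd, hN0⟩
  have h1notin : (1:ℕ) ∉ insert N (N.divisors.filter (fun m => 2 ≤ m ∧ m < N)) := by
    simp only [Finset.mem_insert, Finset.mem_filter]
    rintro (h | ⟨-, h, -⟩) <;> omega
  have hNnotin : N ∉ N.divisors.filter (fun m => 2 ≤ m ∧ m < N) := by
    simp only [Finset.mem_filter]
    rintro ⟨-, -, h⟩; omega
  have hRHS : (∑ m ∈ N.divisors, m)
      = 1 + (N + ((∑ m ∈ N.divisors.filter (fun m => 2 ≤ m ∧ m * m ≤ N), m)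
          + (∑ m ∈ N.divisors.filter (fun m => 2 ≤ m ∧ N < m * m ∧ m < N), m))) := by
    conv_lhs => rw [hdecomp]
    rw [Finset.sum_insert h1notin, Finset.sum_insert hNnotin, hmid, Finset.sum_union hdisj]
  rw [hsplit, hbij, hRHS]
  omega

-- ===== VERDICT (by name: the statement is the Claim_ definition above) =====
theorem chowla_spec : Claim_equal_chowla := by
  intro n _
  unfold Spec_chowla
  by_cases hn : n < 2
  · simp [chowla, chowla_alt, hn]
  · obtain ⟨N, rfl⟩ : ∃ N : ℕ, n = (N : ℤ) := ⟨n.toNat, by omega⟩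
    have hN : 2 ≤ N := by omega
    rw [chowla_A_sum N hN]
    rw [chowla_alt, if_neg (by omega), chowla_B_loop N hN 0 0]
    have hf : (N.divisors.filter (fun m => 2 + 0 ≤ m ∧ m * m ≤ N))
        = (N.divisors.filter (fun m => 2 ≤ m ∧ m * m ≤ N)) := by
      apply Finset.filter_congr; intro m _; simp
    rw [hf]
    have := chowla_pairing N hN
    omega
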